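-- pv_equiv track=rewrite | github.com/vaishnavi9542/python | elections.py | elections
-- ===== SOURCE A (Python) =====
-- def elections(N, A):
--     if N == 1:
--         return A[0]
--     vote = {}
--     for i in A:
--         if i in vote:
--             vote[i] += 1
--         else:
--             vote[i] = 1
--     max_votes = 0
--     winner = -1
--     tie = False
--     for j in vote:
--         if vote[j] > max_votes:
--             max_votes = vote[j]
--             winner = j
--             tie = False
--         elif vote[j] == max_votes:
--             tie = True
--     return -1 if tie else winner
-- ===== SOURCE B (Python) =====
-- def elections(N, A):
--     if N == 1:
--         return A[0]
--     s = sorted(A)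
--     winner, best, ties = -1, 0, 0
--     i, n = 0, len(s)
--     while i < n:
--         j = i + 1
--         while j < n and s[j] == s[i]:
--             j += 1
--         run = j - i
--         if run > best:
--             winner, best, ties = s[i], run, 1
--         elif run == best:
--             ties += 1
--         i = j
--     return winner if ties == 1 else -1
-- ===== Notes on version B (the rewrite author's own statement) =====
-- stated objective: alternative
-- what changed: Replaces A's hash-table counting plus fused running-max-with-tie-flag dict scan by sort-then-scan: sort the votes, walk the equal-value runs with two indices tracking the best run length and how many runs attain it.
import Mathlib
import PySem

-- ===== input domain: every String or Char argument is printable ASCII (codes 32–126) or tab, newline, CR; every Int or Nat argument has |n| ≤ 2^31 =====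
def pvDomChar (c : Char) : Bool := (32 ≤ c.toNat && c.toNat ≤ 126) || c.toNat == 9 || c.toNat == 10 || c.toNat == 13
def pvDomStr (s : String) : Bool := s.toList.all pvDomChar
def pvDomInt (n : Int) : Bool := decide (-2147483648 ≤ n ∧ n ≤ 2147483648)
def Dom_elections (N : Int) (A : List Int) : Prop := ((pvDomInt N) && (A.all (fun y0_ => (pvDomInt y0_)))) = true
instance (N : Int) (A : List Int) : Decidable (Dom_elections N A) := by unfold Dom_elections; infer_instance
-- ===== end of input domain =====

-- B replaces A's hash-table counting + fused max/tie-flag dict scan by sort-then-scan over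
-- equal-value runs (an alternative algorithm of similar cost, not claimed faster).


-- ===== PORT A =====
-- loop body of A's second 'for' loop: state (max_votes, winner, tie), one item (j, vote[j])
def pvStepA (s : Int × Int × Bool) (p : Int × Int) : Int × Int × Bool :=
  if p.2 > s.1 then (p.2, p.1, false)
  else if p.2 = s.1 then (s.1, s.2.1, true)
  else s

def elections (N : Int) (A : List Int) : Int :=
  if N = 1 then
    (PySem.List.pyGet? A 0).getD 0   -- A[0]; none (IndexError) only when A = [], excluded by Pre_
  else
    let vote : PySem.Dict Int Int :=
      A.foldl (fun d i =>
        if d.contains i then d.modify i 0 (· + 1) else d.insert i 1) PySem.Dict.empty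
    let st := vote.items.foldl pvStepA (0, -1, false)
    if st.2.2 then -1 else st.2.1

-- ===== PORT B =====
-- outer while loop of B: state (winner, best, ties); the inner while j advance is the
-- takeWhile/dropWhile split of the current suffix at its head value
def pvRunScan (s : List Int) (st : Int × Int × Int) : Int × Int × Int :=
  match s with
  | [] => st
  | x :: t =>
    let run : Int := (((x :: t).takeWhile (fun y => y == x)).length : Int)
    let rest := t.dropWhile (fun y => y == x)
    pvRunScan rest
      (if run > st.2.1 then (x, run, 1)
       else if run = st.2.1 then (st.1, st.2.1, st.2.2 + 1) else st)
termination_by s.length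
decreasing_by
  have := List.length_dropWhile_le (fun y => y == x) t
  simp only [List.length_cons]; omega

def elections_alt (N : Int) (A : List Int) : Int :=
  if N = 1 then
    (PySem.List.pyGet? A 0).getD 0   -- A[0]; none (IndexError) only when A = [], excluded by Pre_
  else
    let s := PySem.List.sorted A (fun x => x) false
    let st := pvRunScan s (-1, 0, 0)
    if st.2.2 = 1 then st.1 else -1

-- ===== PRECONDITION & SPEC =====
-- Pre_ excludes only N = 1 with empty A, where A (and B) raise IndexError on A[0].
def Pre_elections (N : Int) (A : List Int) : Prop := N = 1 → A ≠ []
instance (N : Int) (A : List Int) : Decidable (Pre_elections N A) := by unfold Pre_elections; infer_instance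
def pvWitness_elections : Int × List Int := (3, [1, 2, 2])

def Spec_elections (N : Int) (A : List Int) (out : Int) : Prop := out = elections_alt N A
instance (N : Int) (A : List Int) (out : Int) : Decidable (Spec_elections N A out) := by unfold Spec_elections; infer_instance

-- ===== CLAIM (what is proved, stated in full; the proofs are below) =====
def Claim_equal_elections : Prop := ∀ (N : Int) (A : List Int), Dom_elections N A → Pre_elections N A → Spec_elections N A (elections N A)

-- ===== LEMMAS AND PROOFS =====

-- The two counting folds build the same dict.
lemma count_step_eq :
    (fun (d : PySem.Dict Int Int) i =>
      if d.contains i then d.modify i 0 (· + 1) else d.insert i 1) =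
    (fun (d : PySem.Dict Int Int) v => d.insert v (d.getD v 0 + 1)) := by
  funext d i
  by_cases h : d.contains i
  · simp [h, PySem.Dict.modify]
  · have hb : d.contains i = false := by simpa using h
    have h0 : d.getD i 0 = 0 := PySem.Dict.getD_of_not_contains d 0 hb
    simp [h, h0]

-- B's loop body, one run (value, run length) at a time.
def pvStepB (st : Int × Int × Int) (p : Int × Int) : Int × Int × Int :=
  if p.2 > st.2.1 then (p.1, p.2, 1)
  else if p.2 = st.2.1 then (st.1, st.2.1, st.2.2 + 1) else st

-- The (value, run length) pairs pvRunScan walks over.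
def pvGroups (s : List Int) : List (Int × Int) :=
  match s with
  | [] => []
  | x :: t =>
    (x, (((x :: t).takeWhile (fun y => y == x)).length : Int)) ::
      pvGroups (t.dropWhile (fun y => y == x))
termination_by s.length
decreasing_by
  have := List.length_dropWhile_le (fun y => y == x) t
  simp only [List.length_cons]; omega

lemma runScan_eq_foldl (s : List Int) : ∀ st, pvRunScan s st = (pvGroups s).foldl pvStepB st := by
  induction s using pvGroups.induct with
  | case1 => intro st; simp [pvRunScan, pvGroups]
  | case2 x t ih =>
    intro st
    rw [pvRunScan, pvGroups, List.foldl_cons, ih]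
    rfl

-- On a sorted suffix all of whose elements are ≥ x, dropping the x-run is filtering x out.
lemma drop_eq_filter (x : Int) (t : List Int) (h : t.Pairwise (· ≤ ·))
    (hx : ∀ y ∈ t, x ≤ y) :
    t.dropWhile (fun y => y == x) = t.filter (fun y => y != x) := by
  induction t with
  | nil => simp
  | cons y u ih =>
    have hu : u.Pairwise (· ≤ ·) := h.tail
    have hyu : ∀ z ∈ u, y ≤ z := fun z hz => List.rel_of_pairwise_cons h hz
    by_cases hy : y = x
    · subst hy
      rw [List.dropWhile_cons_of_pos (by simp), List.filter_cons_of_neg (by simp)]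
      exact ih hu hyu
    · have hxy : x < y := lt_of_le_of_ne (hx y (List.mem_cons_self ..)) (Ne.symm hy)
      rw [List.dropWhile_cons_of_neg (by simp [hy]), List.filter_cons_of_pos (by simp [hy])]
      rw [List.filter_eq_self.2]
      intro z hz
      have := hyu z hz
      simp only [bne_iff_ne, ne_eq]
      omega

-- Characterisation of the groups of a sorted list: distinct values paired with their counts,
-- with distinct keys.
lemma groups_char (s : List Int) : s.Pairwise (· ≤ ·) →
    (∀ p : Int × Int, p ∈ pvGroups s ↔ (p.1 ∈ s ∧ p.2 = (s.count p.1 : Int))) ∧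
    ((pvGroups s).map Prod.fst).Nodup := by
  induction s using pvGroups.induct with
  | case1 => simp [pvGroups]
  | case2 x t ih =>
    intro h
    have hu : t.Pairwise (· ≤ ·) := h.tail
    have hxt : ∀ z ∈ t, x ≤ z := fun z hz => List.rel_of_pairwise_cons h hz
    have hdrop : t.dropWhile (fun y => y == x) = t.filter (fun y => y != x) :=
      drop_eq_filter x t hu hxt
    have hrest_pw : (t.dropWhile (fun y => y == x)).Pairwise (· ≤ ·) := by
      rw [hdrop]; exact hu.sublist List.filter_sublist
    obtain ⟨ihmem, ihnd⟩ := ih hrest_pw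
    have hlen : ((x :: t).takeWhile (fun y => y == x)).length = (x :: t).count x := by
      have h1 : (x :: t).takeWhile (fun y => y == x) = x :: t.takeWhile (fun y => y == x) := by simp
      have h2 : (t.takeWhile (fun y => y == x)).length + (t.dropWhile (fun y => y == x)).length = t.length := by
        rw [← List.length_append, List.takeWhile_append_dropWhile]
      have h3 : (t.dropWhile (fun y => y == x)).length = t.countP (fun y => y != x) := by
        rw [hdrop]; exact (List.countP_eq_length_filter).symm
      have h4 : t.countP (fun y => y == x) + t.countP (fun y => y != x) = t.length := by
        have h := List.length_eq_countP_add_countP (p := fun y => y == x) (l := t)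
        have h2' : t.countP (fun y => y != x) = t.countP (fun a => decide ¬(a == x) = true) := by
          apply List.countP_congr; intro a _; simp [bne]
        omega
      have h5 : t.count x = t.countP (fun y => y == x) := by simp [List.count_eq_countP]
      rw [h1, List.count_cons_self]
      simp only [List.length_cons]
      omega
    have hmemrest : ∀ p : Int × Int,
        p ∈ pvGroups (t.dropWhile (fun y => y == x)) ↔
          (p.1 ∈ t ∧ p.1 ≠ x ∧ p.2 = (t.count p.1 : Int)) := by
      intro p
      rw [ihmem p, hdrop]
      constructor
      · rintro ⟨hm, hc⟩
        have hmx : p.1 ∈ t ∧ p.1 ≠ x := by simpa using List.mem_filter.1 hm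
        refine ⟨hmx.1, hmx.2, ?_⟩
        rw [hc, List.count_filter (by simp [hmx.2])]
      · rintro ⟨hm, hne, hc⟩
        refine ⟨List.mem_filter.2 (by simp [hm, hne]), ?_⟩
        rw [List.count_filter (by simp [hne])]
        exact hc
    constructor
    · rintro ⟨a, c⟩
      rw [pvGroups, List.mem_cons, hmemrest (a, c)]
      by_cases hp1 : a = x
      · subst hp1
        have hlen' : (t.takeWhile (fun y => y == a)).length = t.count a := by
          simpa using hlen
        simp [hlen']
      · simp only [Prod.ext_iff, hp1, false_and, false_or, List.mem_cons, ne_eq,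
          not_false_iff, true_and]
        simp [Ne.symm hp1]
    · rw [pvGroups]
      simp only [List.map_cons, List.nodup_cons]
      refine ⟨?_, ihnd⟩
      intro hx
      obtain ⟨p, hp, hpf⟩ := List.mem_map.1 hx
      exact ((hmemrest p).1 hp).2.1 hpf

-- State of A's scan after a whole items list L (values all ≥ 1).
lemma scan_char (L : List (Int × Int)) (hpos : ∀ p ∈ L, 1 ≤ p.2) :
    L.foldl pvStepA (0, -1, false) =
      ((L.map Prod.snd).foldl max 0,
       ((L.filter (fun p => p.2 = (L.map Prod.snd).foldl max 0)).map Prod.fst).headD (-1),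
       decide (2 ≤ (L.filter (fun p => p.2 = (L.map Prod.snd).foldl max 0)).length)) := by
  induction L using List.reverseRecOn with
  | nil => simp
  | append_singleton L p ih =>
    have hposL : ∀ q ∈ L, 1 ≤ q.2 := fun q hq => hpos q (List.mem_append_left _ hq)
    have hp1 : 1 ≤ p.2 := hpos p (by simp)
    have hMge : ∀ q ∈ L, q.2 ≤ (L.map Prod.snd).foldl max 0 := by
      intro q hq
      exact (PySem.List.le_foldl_max (L.map Prod.snd) 0).2 q.2 (List.mem_map_of_mem hq)
    have hfoldl : (L ++ [p]).foldl pvStepA (0, -1, false) =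
        pvStepA (L.foldl pvStepA (0, -1, false)) p := by
      simp [List.foldl_append]
    have hmax : ((L ++ [p]).map Prod.snd).foldl max 0 =
        max ((L.map Prod.snd).foldl max 0) p.2 := by
      simp [List.foldl_append]
    rw [hfoldl, ih hposL]
    rcases lt_trichotomy ((L.map Prod.snd).foldl max 0) p.2 with h | h | h
    · have hfL : L.filter (fun q => q.2 = p.2) = [] := by
        rw [List.filter_eq_nil_iff]
        intro q hq
        have := hMge q hq
        simp
        omega
      have : pvStepA ((L.map Prod.snd).foldl max 0,
          ((L.filter (fun q => q.2 = (L.map Prod.snd).foldl max 0)).map Prod.fst).headD (-1),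
          decide (2 ≤ (L.filter (fun q => q.2 = (L.map Prod.snd).foldl max 0)).length)) p
          = (p.2, p.1, false) := by
        simp [pvStepA, h]
      rw [this, hmax, max_eq_right h.le]
      simp [List.filter_append, hfL]
    · have hM1 : 1 ≤ (L.map Prod.snd).foldl max 0 := h ▸ hp1
      have hmem : (L.map Prod.snd).foldl max 0 ∈ L.map Prod.snd := by
        rcases PySem.List.foldl_max_mem (L.map Prod.snd) 0 with h0 | h0
        · omega
        · exact h0
      obtain ⟨q, hqL, hq2⟩ := List.mem_map.1 hmem
      have hF : q ∈ L.filter (fun r => r.2 = (L.map Prod.snd).foldl max 0) := by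
        simp [List.mem_filter, hqL, hq2]
      obtain ⟨f0, ftl, hFeq⟩ := List.exists_cons_of_ne_nil (List.ne_nil_of_mem hF)
      have hstep : pvStepA ((L.map Prod.snd).foldl max 0,
          ((L.filter (fun r => r.2 = (L.map Prod.snd).foldl max 0)).map Prod.fst).headD (-1),
          decide (2 ≤ (L.filter (fun r => r.2 = (L.map Prod.snd).foldl max 0)).length)) p
          = ((L.map Prod.snd).foldl max 0,
             ((L.filter (fun r => r.2 = (L.map Prod.snd).foldl max 0)).map Prod.fst).headD (-1),
             true) := by
        simp [pvStepA, h.symm]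
      rw [hstep, hmax, ← h, max_self]
      have hpM : p.2 = (L.map Prod.snd).foldl max 0 := h.symm
      simp [List.filter_append, hpM, hFeq]
    · have hne1 : ¬ ((L.map Prod.snd).foldl max 0 < p.2) := by omega
      have hne2 : ¬ (p.2 = (L.map Prod.snd).foldl max 0) := by omega
      have hstep : pvStepA ((L.map Prod.snd).foldl max 0,
          ((L.filter (fun r => r.2 = (L.map Prod.snd).foldl max 0)).map Prod.fst).headD (-1),
          decide (2 ≤ (L.filter (fun r => r.2 = (L.map Prod.snd).foldl max 0)).length)) p
          = ((L.map Prod.snd).foldl max 0,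
             ((L.filter (fun r => r.2 = (L.map Prod.snd).foldl max 0)).map Prod.fst).headD (-1),
             decide (2 ≤ (L.filter (fun r => r.2 = (L.map Prod.snd).foldl max 0)).length)) := by
        simp only [pvStepA]
        rw [if_neg (by simpa using hne1), if_neg hne2]
      rw [hstep, hmax, max_eq_left h.le]
      simp [List.filter_append, hne2]

-- State of B's scan after a whole group list L (run lengths all ≥ 1).
lemma scan_charB (L : List (Int × Int)) (hpos : ∀ p ∈ L, 1 ≤ p.2) :
    L.foldl pvStepB (-1, 0, 0) =
      (((L.filter (fun p => p.2 = (L.map Prod.snd).foldl max 0)).map Prod.fst).headD (-1),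
       (L.map Prod.snd).foldl max 0,
       ((L.filter (fun p => p.2 = (L.map Prod.snd).foldl max 0)).length : Int)) := by
  induction L using List.reverseRecOn with
  | nil => simp
  | append_singleton L p ih =>
    have hposL : ∀ q ∈ L, 1 ≤ q.2 := fun q hq => hpos q (List.mem_append_left _ hq)
    have hp1 : 1 ≤ p.2 := hpos p (by simp)
    have hMge : ∀ q ∈ L, q.2 ≤ (L.map Prod.snd).foldl max 0 := by
      intro q hq
      exact (PySem.List.le_foldl_max (L.map Prod.snd) 0).2 q.2 (List.mem_map_of_mem hq)
    have hfoldl : (L ++ [p]).foldl pvStepB (-1, 0, 0) =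
        pvStepB (L.foldl pvStepB (-1, 0, 0)) p := by
      simp [List.foldl_append]
    have hmax : ((L ++ [p]).map Prod.snd).foldl max 0 =
        max ((L.map Prod.snd).foldl max 0) p.2 := by
      simp [List.foldl_append]
    rw [hfoldl, ih hposL]
    rcases lt_trichotomy ((L.map Prod.snd).foldl max 0) p.2 with h | h | h
    · have hfL : L.filter (fun q => q.2 = p.2) = [] := by
        rw [List.filter_eq_nil_iff]
        intro q hq
        have := hMge q hq
        simp
        omega
      have hstep : pvStepB (((L.filter (fun q => q.2 = (L.map Prod.snd).foldl max 0)).map Prod.fst).headD (-1),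
          (L.map Prod.snd).foldl max 0,
          ((L.filter (fun q => q.2 = (L.map Prod.snd).foldl max 0)).length : Int)) p
          = (p.1, p.2, 1) := by
        simp [pvStepB, h]
      rw [hstep, hmax, max_eq_right h.le]
      simp [List.filter_append, hfL]
    · have hM1 : 1 ≤ (L.map Prod.snd).foldl max 0 := h ▸ hp1
      have hmem : (L.map Prod.snd).foldl max 0 ∈ L.map Prod.snd := by
        rcases PySem.List.foldl_max_mem (L.map Prod.snd) 0 with h0 | h0
        · omega
        · exact h0
      obtain ⟨q, hqL, hq2⟩ := List.mem_map.1 hmem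
      have hF : q ∈ L.filter (fun r => r.2 = (L.map Prod.snd).foldl max 0) := by
        simp [List.mem_filter, hqL, hq2]
      obtain ⟨f0, ftl, hFeq⟩ := List.exists_cons_of_ne_nil (List.ne_nil_of_mem hF)
      have hstep : pvStepB (((L.filter (fun r => r.2 = (L.map Prod.snd).foldl max 0)).map Prod.fst).headD (-1),
          (L.map Prod.snd).foldl max 0,
          ((L.filter (fun r => r.2 = (L.map Prod.snd).foldl max 0)).length : Int)) p
          = (((L.filter (fun r => r.2 = (L.map Prod.snd).foldl max 0)).map Prod.fst).headD (-1),
             (L.map Prod.snd).foldl max 0,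
             ((L.filter (fun r => r.2 = (L.map Prod.snd).foldl max 0)).length : Int) + 1) := by
        simp [pvStepB, h.symm]
      rw [hstep, hmax, ← h, max_self]
      have hpM : p.2 = (L.map Prod.snd).foldl max 0 := h.symm
      rw [List.filter_append, List.filter_cons, if_pos (by simpa using hpM)]
      simp [hFeq]
    · have hne1 : ¬ ((L.map Prod.snd).foldl max 0 < p.2) := by omega
      have hne2 : ¬ (p.2 = (L.map Prod.snd).foldl max 0) := by omega
      have hstep : pvStepB (((L.filter (fun r => r.2 = (L.map Prod.snd).foldl max 0)).map Prod.fst).headD (-1),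
          (L.map Prod.snd).foldl max 0,
          ((L.filter (fun r => r.2 = (L.map Prod.snd).foldl max 0)).length : Int)) p
          = (((L.filter (fun r => r.2 = (L.map Prod.snd).foldl max 0)).map Prod.fst).headD (-1),
             (L.map Prod.snd).foldl max 0,
             ((L.filter (fun r => r.2 = (L.map Prod.snd).foldl max 0)).length : Int)) := by
        simp only [pvStepB]
        rw [if_neg (by simpa using hne1), if_neg hne2]
      rw [hstep, hmax, max_eq_left h.le]
      simp [List.filter_append, hne2]

-- ===== VERDICT (by name: the statement is the Claim_ definition above) =====
theorem elections_spec : Claim_equal_elections := by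
  intro N A hdom hpre
  unfold Spec_elections elections elections_alt
  rcases eq_or_ne N 1 with h1 | h1
  · simp [h1]
  · simp only [if_neg h1]
    rw [count_step_eq, PySem.Dict.foldl_insert_getD_add_one_eq_counter,
      PySem.Dict.items_counter]
    set s := PySem.List.sorted A (fun x => x) false with hs
    have hs_pw : s.Pairwise (· ≤ ·) := by
      simpa using PySem.List.sorted_pairwise (xs := A) (key := fun x => x)
    have hsp : s.Perm A := PySem.List.sorted_perm A _ _
    set L1 := (PySem.Set.ofList A).map (fun k => (k, (A.count k : Int))) with hL1
    set L2 := pvGroups s with hL2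
    obtain ⟨h2mem, h2nd⟩ := groups_char s hs_pw
    have h1mem : ∀ p : Int × Int, p ∈ L1 ↔ (p.1 ∈ A ∧ p.2 = (A.count p.1 : Int)) := by
      intro p
      rw [hL1, List.mem_map]
      constructor
      · rintro ⟨k, hk, rfl⟩
        exact ⟨(PySem.Set.mem_ofList A k).1 hk, rfl⟩
      · rintro ⟨hm, hc⟩
        exact ⟨p.1, (PySem.Set.mem_ofList A p.1).2 hm, by rw [← hc]⟩
    have h1nd : L1.Nodup :=
      (PySem.Set.nodup_ofList A).map (fun a b hab => congrArg Prod.fst hab)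
    have h2nd' : L2.Nodup := h2nd.of_map
    have hmem_iff : ∀ p : Int × Int, p ∈ L1 ↔ p ∈ L2 := by
      intro p
      rw [h1mem p, h2mem p, hsp.mem_iff, hsp.count_eq]
    have hperm : L1.Perm L2 := (List.perm_ext_iff_of_nodup h1nd h2nd').2 hmem_iff
    have hpos1 : ∀ p ∈ L1, 1 ≤ p.2 := by
      intro p hp
      obtain ⟨hm, hc⟩ := (h1mem p).1 hp
      have : 0 < A.count p.1 := List.count_pos_iff.2 hm
      omega
    have hpos2 : ∀ p ∈ L2, 1 ≤ p.2 := fun p hp => hpos1 p ((hmem_iff p).2 hp)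
    rw [runScan_eq_foldl, ← hL2, scan_char L1 hpos1, scan_charB L2 hpos2]
    have hM : (L2.map Prod.snd).foldl max 0 = (L1.map Prod.snd).foldl max 0 :=
      List.Perm.foldl_op_eq (hperm.map Prod.snd).symm
    rw [hM]
    set M := (L1.map Prod.snd).foldl max 0 with hMdef
    have hfperm : (L1.filter (fun p => p.2 = M)).Perm (L2.filter (fun p => p.2 = M)) :=
      hperm.filter _
    have hlen : (L1.filter (fun p => p.2 = M)).length = (L2.filter (fun p => p.2 = M)).length :=
      hfperm.length_eq
    simp only []
    rcases hn : (L1.filter (fun p => p.2 = M)).length with _ | n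
    · -- no entry attains M: both filters empty, A's tie flag false, winner -1
      have he1 : L1.filter (fun p => p.2 = M) = [] := List.length_eq_zero_iff.1 hn
      have he2 : L2.filter (fun p => p.2 = M) = [] := List.length_eq_zero_iff.1 (hlen ▸ hn)
      simp [he1, he2]
    · rcases n with _ | n
      · -- unique maximum: both return the sole key attaining M
        have h12 : L2.filter (fun p => p.2 = M) = L1.filter (fun p => p.2 = M) := by
          obtain ⟨a, ha⟩ := List.length_eq_one_iff.1 hn
          rw [ha] at hfperm ⊢
          rw [List.perm_singleton.1 hfperm.symm]
        rw [← hlen, hn, h12]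
        simp
      · -- two or more entries attain M: a tie, both return -1
        rw [← hlen, hn]
        have : (2 : Nat) ≤ n + 1 + 1 := by omega
        simp [this]
        omega
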